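-- pv_equiv track=rewrite | github.com/thewymoon/CDT | interpret.py | positive_ranges
-- ===== SOURCE A (Python) =====
-- def positive_ranges(values):
--     ranges = []
--     temp = []
--     state = 0
--     for i in range(len(values)):
--         if state==0 and values[i]<=0:
--             pass
--         elif state==0 and values[i]>0:
--             temp.append(i)
--             state = 1
--         elif state==1 and values[i]>0:
--             pass
--         elif state==1 and values[i]<=0:
--             temp.append(i)
--             state = 0
--             ranges.append(temp)
--             temp=[]
--     return ranges
-- ===== SOURCE B (Python) =====
-- def positive_ranges(values):
--     # Two-pointer run scan: find each maximal positive run directly and skip past it,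
--     # instead of a per-element state machine. A run only ending at end-of-list is dropped.
--     n = len(values)
--     res = []
--     i = 0
--     while i < n:
--         if values[i] > 0:
--             j = i + 1
--             while j < n and values[j] > 0:
--                 j += 1
--             if j < n:
--                 res.append([i, j])
--             i = j + 1
--         else:
--             i += 1
--     return res
-- ===== Notes on version B (the rewrite author's own statement) =====
-- stated objective: alternative
-- what changed: Replaced the per-element 0/1 state machine accumulating a temp list with a two-pointer scan that locates each maximal positive run directly (inner scan to its end) and skips past it.
import Mathlib
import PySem

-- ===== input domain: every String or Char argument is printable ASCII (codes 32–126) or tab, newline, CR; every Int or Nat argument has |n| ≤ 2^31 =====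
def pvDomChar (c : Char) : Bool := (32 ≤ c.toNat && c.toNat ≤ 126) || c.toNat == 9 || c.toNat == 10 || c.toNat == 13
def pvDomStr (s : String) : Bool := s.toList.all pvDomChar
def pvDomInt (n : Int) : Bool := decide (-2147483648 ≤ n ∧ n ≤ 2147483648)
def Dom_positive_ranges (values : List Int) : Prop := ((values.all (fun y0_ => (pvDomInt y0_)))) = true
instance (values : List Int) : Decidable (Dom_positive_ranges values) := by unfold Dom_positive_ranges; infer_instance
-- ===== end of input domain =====

-- B replaces A's per-element 0/1 state machine by a two-pointer scan that finds each
-- maximal positive run directly and skips past it; same O(n) cost, different decomposition.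

-- ===== PORT A =====
-- state machine over indices: (ranges, temp, state)
def positive_ranges (values : List Int) : List (List Int) :=
  let r := (PySem.List.pyRange 0 (PySem.List.len values) 1).foldl
    (fun (s : List (List Int) × List Int × Int) i =>
      let ranges := s.1; let temp := s.2.1; let state := s.2.2
      let v := PySem.List.pyGetD values i 0
      if state = 0 ∧ v ≤ 0 then (ranges, temp, state)
      else if state = 0 ∧ v > 0 then (ranges, temp ++ [i], 1)
      else if state = 1 ∧ v > 0 then (ranges, temp, state)
      else if state = 1 ∧ v ≤ 0 then (ranges ++ [temp ++ [i]], [], 0)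
      else (ranges, temp, state))
    ([], [], 0)
  r.1

-- ===== PORT B =====
-- inner while loop: length of the leading positive run
def posLen : List Int → Nat
  | [] => 0
  | x :: xs => if x > 0 then posLen xs + 1 else 0

-- outer while loop over the remaining suffix, carrying the absolute index i
def bLoop : List Int → Int → List (List Int)
  | [], _ => []
  | x :: xs, i =>
    if x > 0 then
      let k := posLen xs            -- j = i + 1 + k
      match h : xs.drop k with
      | [] => []                     -- run reaches end of list: dropped
      | _ :: rest => [i, i + 1 + (k : Int)] :: bLoop rest (i + 1 + (k : Int) + 1)
    else bLoop xs (i + 1)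
  termination_by l _ => l.length
  decreasing_by
  · have h1 : (xs.drop (posLen xs)).length = xs.length - posLen xs := List.length_drop
    rw [h] at h1
    simp at h1 ⊢
    omega
  · simp

def positive_ranges_alt (values : List Int) : List (List Int) := bLoop values 0

-- ===== PRECONDITION & SPEC =====
def Spec_positive_ranges (values : List Int) (out : List (List Int)) : Prop := out = positive_ranges_alt values
instance (values : List Int) (out : List (List Int)) : Decidable (Spec_positive_ranges values out) := by unfold Spec_positive_ranges; infer_instance

-- ===== CLAIM (what is proved, stated in full; the proofs are below) =====
def Claim_equal_positive_ranges : Prop := ∀ (values : List Int), Dom_positive_ranges values → Spec_positive_ranges values (positive_ranges values)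

-- ===== LEMMAS AND PROOFS =====

-- A's loop body as a function of (index, value)
def aStep (s : List (List Int) × List Int × Int) (p : Int × Int) : List (List Int) × List Int × Int :=
  let ranges := s.1; let temp := s.2.1; let state := s.2.2
  let v := p.2
  if state = 0 ∧ v ≤ 0 then (ranges, temp, state)
  else if state = 0 ∧ v > 0 then (ranges, temp ++ [p.1], 1)
  else if state = 1 ∧ v > 0 then (ranges, temp, state)
  else if state = 1 ∧ v ≤ 0 then (ranges ++ [temp ++ [p.1]], [], 0)
  else (ranges, temp, state)

-- what the open-run tail of the fold produces
def openTail (values : List Int) (i s : Int) : List (List Int) :=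
  match values.drop (posLen values) with
  | [] => []
  | _ :: rest => [s, i + (posLen values : Int)] :: bLoop rest (i + (posLen values : Int) + 1)

theorem fold_both (values : List Int) :
    (∀ (i : Int) (ranges : List (List Int)),
      ((PySem.List.enumerate values i).foldl aStep (ranges, [], 0)).1 = ranges ++ bLoop values i) ∧
    (∀ (i s : Int) (ranges : List (List Int)),
      ((PySem.List.enumerate values i).foldl aStep (ranges, [s], 1)).1 = ranges ++ openTail values i s) := by
  induction values with
  | nil => simp [PySem.List.enumerate_nil, openTail, posLen, bLoop]
  | cons x xs ih =>
    obtain ⟨ih0, ih1⟩ := ih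
    constructor
    · intro i ranges
      rw [PySem.List.enumerate_cons]
      by_cases hx : x > 0
      · have hx' : ¬ x ≤ 0 := by omega
        have hstep : aStep (ranges, [], 0) (i, x) = (ranges, [i], 1) := by
          simp [aStep, hx, hx']
        rw [List.foldl_cons, hstep, ih1]
        simp only [bLoop, if_pos hx, openTail]
        cases xs.drop (posLen xs) with
        | nil => simp
        | cons y rest => simp
      · have hx' : x ≤ 0 := by omega
        have hstep : aStep (ranges, [], 0) (i, x) = (ranges, [], 0) := by
          simp [aStep, hx']
        rw [List.foldl_cons, hstep, ih0]
        simp only [bLoop, if_neg hx]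
    · intro i s ranges
      rw [PySem.List.enumerate_cons]
      by_cases hx : x > 0
      · have hx' : ¬ x ≤ 0 := by omega
        have hstep : aStep (ranges, [s], 1) (i, x) = (ranges, [s], 1) := by
          simp [aStep, hx, hx']
        rw [List.foldl_cons, hstep, ih1]
        simp only [openTail, posLen, if_pos hx, List.drop_succ_cons]
        cases xs.drop (posLen xs) with
        | nil => simp
        | cons y rest =>
          have e1 : i + ((posLen xs : Int) + 1) = i + 1 + (posLen xs : Int) := by ring
          push_cast
          rw [e1]
      · have hx' : x ≤ 0 := by omega
        have hstep : aStep (ranges, [s], 1) (i, x) = (ranges ++ [[s, i]], [], 0) := by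
          simp [aStep, hx, hx']
        rw [List.foldl_cons, hstep, ih0]
        simp only [openTail, posLen, if_neg hx, List.drop_zero]
        simp

-- ===== VERDICT (by name: the statement is the Claim_ definition above) =====
theorem positive_ranges_spec : Claim_equal_positive_ranges := by
  intro values _
  show positive_ranges values = positive_ranges_alt values
  unfold positive_ranges positive_ranges_alt
  have hmap := PySem.List.enumerate_eq_map_pyRange (xs := values) (d := (0 : Int))
  have : (PySem.List.pyRange 0 (PySem.List.len values) 1).foldl
      (fun (s : List (List Int) × List Int × Int) i =>
        aStep s (i, PySem.List.pyGetD values i 0)) (([], [], 0)) =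
      (PySem.List.enumerate values 0).foldl aStep (([], [], 0)) := by
    rw [hmap, List.foldl_map]
  simp only [aStep] at this
  rw [this]
  rw [(fold_both values).1 0 []]
  simp
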